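-- pv_equiv track=rewrite | github.com/lavallone/NLP | HW_02/hw2/stud/src/data_module.py | token2emb_idx
-- ===== SOURCE A (Python) =====
-- def token2emb_idx(sense_idx, word_ids):
--     ris = []
--     i = 0
--     for word_id in word_ids:
--         if ris != [] and word_id != sense_idx: # to make it more efficient
--             break
--         if word_id==sense_idx:
--             ris.append(i)
--         i+=1
--     return ris
-- ===== SOURCE B (Python) =====
-- def token2emb_idx(sense_idx, word_ids):
--     if sense_idx not in word_ids:
--         return []
--     start = word_ids.index(sense_idx)
--     res = []
--     i = start
--     while i < len(word_ids) and word_ids[i] == sense_idx: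
--         res.append(i)
--         i += 1
--     return res
-- ===== Notes on version B (the rewrite author's own statement) =====
-- stated objective: alternative
-- what changed: A's single flagged scan (break once the result is nonempty and a non-match appears) becomes a locate-then-extend pair: list.index finds the first match, then a while loop collects only the contiguous run.
import Mathlib
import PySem

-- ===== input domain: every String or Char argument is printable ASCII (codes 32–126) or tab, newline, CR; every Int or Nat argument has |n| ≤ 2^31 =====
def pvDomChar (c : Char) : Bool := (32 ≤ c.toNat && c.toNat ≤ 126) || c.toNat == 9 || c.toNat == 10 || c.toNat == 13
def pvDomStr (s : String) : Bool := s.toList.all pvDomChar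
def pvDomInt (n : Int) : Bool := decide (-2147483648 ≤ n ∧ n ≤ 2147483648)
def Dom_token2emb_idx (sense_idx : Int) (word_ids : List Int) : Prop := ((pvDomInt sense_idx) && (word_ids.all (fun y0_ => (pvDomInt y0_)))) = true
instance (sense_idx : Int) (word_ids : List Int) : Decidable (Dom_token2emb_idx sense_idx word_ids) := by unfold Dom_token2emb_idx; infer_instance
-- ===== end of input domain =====

-- B replaces A's single flagged scan (break once the list is nonempty and a non-match appears)
-- with a locate-then-extend pair: list.index finds the first match, a while loop collects the run.

-- ===== PORT A =====
-- A's for-loop over word_ids with state (ris, i); the 'break' returns ris.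
def token2emb_idx_loopA (sense_idx : Int) : List Int → Int → List Int → List Int
  | [], _, ris => ris
  | w :: ws, i, ris =>
      if ris ≠ [] ∧ w ≠ sense_idx then ris
      else token2emb_idx_loopA sense_idx ws (i + 1) (if w = sense_idx then ris ++ [i] else ris)

def token2emb_idx (sense_idx : Int) (word_ids : List Int) : List Int :=
  token2emb_idx_loopA sense_idx word_ids 0 []

-- ===== PORT B =====
-- B's while loop 'while i < len and word_ids[i] == sense_idx: append i; i += 1',
-- transcribed as recursion on the remaining suffix word_ids[i:] carrying the index i.
def token2emb_idx_extendB (sense_idx : Int) : List Int → Nat → List Int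
  | [], _ => []
  | w :: ws, i => if w = sense_idx then (i : Int) :: token2emb_idx_extendB sense_idx ws (i + 1) else []

def token2emb_idx_alt (sense_idx : Int) (word_ids : List Int) : List Int :=
  match PySem.List.index? word_ids sense_idx with   -- 'if sense_idx not in word_ids: return []' + 'word_ids.index(sense_idx)'
  | none => []
  | some start => token2emb_idx_extendB sense_idx (word_ids.drop start) start

-- ===== PRECONDITION & SPEC =====
def Spec_token2emb_idx (sense_idx : Int) (word_ids : List Int) (out : List Int) : Prop := out = token2emb_idx_alt sense_idx word_ids
instance (sense_idx : Int) (word_ids : List Int) (out : List Int) : Decidable (Spec_token2emb_idx sense_idx word_ids out) := by unfold Spec_token2emb_idx; infer_instance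

-- ===== CLAIM (what is proved, stated in full; the proofs are below) =====
def Claim_equal_token2emb_idx : Prop := ∀ (sense_idx : Int) (word_ids : List Int), Dom_token2emb_idx sense_idx word_ids → Spec_token2emb_idx sense_idx word_ids (token2emb_idx sense_idx word_ids)

-- ===== LEMMAS AND PROOFS =====

-- Once ris is nonempty, A's loop appends exactly the contiguous run B's extend phase produces.
theorem loopA_nonempty (sense_idx : Int) (ws : List Int) : ∀ (n : Nat) (ris : List Int), ris ≠ [] →
    token2emb_idx_loopA sense_idx ws (n : Int) ris = ris ++ token2emb_idx_extendB sense_idx ws n := by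
  induction ws with
  | nil => intro n ris _; simp [token2emb_idx_loopA, token2emb_idx_extendB]
  | cons w ws ih =>
    intro n ris hris
    by_cases hw : w = sense_idx
    · have h1 : ((n : Int) + 1) = ((n + 1 : Nat) : Int) := by push_cast; ring
      simp only [token2emb_idx_loopA, token2emb_idx_extendB, hw, ite_true, h1]
      rw [ih (n + 1) (ris ++ [(n : Int)]) (by simp)]
      simp
    · simp [token2emb_idx_loopA, token2emb_idx_extendB, hw, hris]

-- A's loop from an empty accumulator equals B's locate-then-extend, for any starting index n.
theorem loopA_empty (sense_idx : Int) (ws : List Int) : ∀ (n : Nat),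
    token2emb_idx_loopA sense_idx ws (n : Int) [] =
      (match PySem.List.index? ws sense_idx with
       | none => []
       | some k => token2emb_idx_extendB sense_idx (ws.drop k) (n + k)) := by
  induction ws with
  | nil => intro n; simp [token2emb_idx_loopA, PySem.List.index?]
  | cons w ws ih =>
    intro n
    by_cases hw : w = sense_idx
    · subst hw
      rw [PySem.List.index?_cons_self]
      have h1 : ((n : Int) + 1) = ((n + 1 : Nat) : Int) := by push_cast; ring
      simp only [token2emb_idx_loopA, h1, List.drop_zero, Nat.add_zero]
      rw [if_neg (by simp), if_pos trivial, List.nil_append,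
        loopA_nonempty w ws (n + 1) [(n : Int)] (by simp)]
      simp [token2emb_idx_extendB]
    · rw [PySem.List.index?_cons_of_ne ws hw]
      have h1 : ((n : Int) + 1) = ((n + 1 : Nat) : Int) := by push_cast; ring
      simp only [token2emb_idx_loopA, hw, h1, if_false]
      rw [if_neg (by simp), ih (n + 1)]
      cases PySem.List.index? ws sense_idx with
      | none => simp
      | some k => simp [List.drop_succ_cons]; ring_nf

-- ===== VERDICT (by name: the statement is the Claim_ definition above) =====
theorem token2emb_idx_spec : Claim_equal_token2emb_idx := by
  intro sense_idx word_ids _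
  unfold Spec_token2emb_idx token2emb_idx token2emb_idx_alt
  have h := loopA_empty sense_idx word_ids 0
  simpa using h
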